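-- pv_equiv track=rewrite | github.com/d-keel/advent-of-code | 2025/3/driver.py | findBiggerJoltage
-- ===== SOURCE A (Python) =====
-- def findBiggerJoltage(line: list[int]) -> str:
--     stack: list[int] = []
--     sz: int = len(line)
--     joltage: str = ""
--
--     for i, v in enumerate(line):
--         while stack and stack[-1] < v and len(stack) + (sz - i) > 12:
--             _ = stack.pop()
--         if len(stack) < 12:
--             stack.append(v)
--
--     for num in stack:
--         joltage += str(num)
--
--     return joltage
-- ===== SOURCE B (Python) =====
-- def findBiggerJoltage(line: list[int]) -> str:
--     def pick(k: int, xs: list[int]) -> list[int]: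
--         if k == 0:
--             return []
--         window = xs[:len(xs) - k + 1]
--         m = max(window)
--         i = window.index(m)
--         return [m] + pick(k - 1, xs[i + 1:])
--     return "".join(str(x) for x in pick(min(12, len(line)), line))
-- ===== Notes on version B (the rewrite author's own statement) =====
-- stated objective: alternative
-- what changed: Replaces A's single push/pop monotonic-stack pass (capacity 12) by a recursive greedy selection that repeatedly takes the leftmost maximum of the feasible window xs[:len(xs)-k+1] (via built-in max/index) and recurses on the suffix after it.
import Mathlib
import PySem

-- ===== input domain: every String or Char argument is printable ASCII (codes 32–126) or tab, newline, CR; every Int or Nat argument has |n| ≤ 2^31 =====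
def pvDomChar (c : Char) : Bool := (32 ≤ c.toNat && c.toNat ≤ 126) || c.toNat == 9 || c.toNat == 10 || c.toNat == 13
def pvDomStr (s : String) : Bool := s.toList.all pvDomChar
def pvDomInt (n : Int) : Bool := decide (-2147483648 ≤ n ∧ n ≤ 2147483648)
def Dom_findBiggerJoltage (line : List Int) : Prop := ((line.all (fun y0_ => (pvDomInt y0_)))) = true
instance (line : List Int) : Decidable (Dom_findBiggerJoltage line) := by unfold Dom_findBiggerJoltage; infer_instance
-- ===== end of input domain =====

-- B replaces A's single push/pop monotonic-stack pass by a recursive leftmost-window-max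
-- selection (objective: alternative decomposition, same result).

-- ===== PORT A =====
-- the Python 'while stack and stack[-1] < v and len(stack)+(sz-i) > 12: stack.pop()'
def popLoop (stack : List Int) (v : Int) (avail : Int) : List Int :=
  if h : stack = [] then stack
  else if stack.getLast h < v ∧ (stack.length : Int) + avail > 12 then
    popLoop stack.dropLast v avail
  else stack
termination_by stack.length
decreasing_by
  simp only [List.length_dropLast]
  have := List.length_pos_iff.mpr h
  omega

-- the 'for i, v in enumerate(line)' loop, state = stack
def loopA (sz : Int) : List Int → Int → List Int → List Int
  | stack, _, [] => stack
  | stack, i, v :: rest =>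
    let s' := popLoop stack v (sz - i)
    loopA sz (if s'.length < 12 then s' ++ [v] else s') (i + 1) rest

def findBiggerJoltage (line : List Int) : String :=
  (loopA (line.length : Int) [] 0 line).foldl
    (fun joltage num => joltage ++ PySem.Int.toStr num) ""

-- ===== PORT B =====
-- Source B's recursive pick(k, xs): window = xs[:len(xs)-k+1]; m = max(window); i = window.index(m)
def pickB : Nat → List Int → List Int
  | 0, _ => []
  | k + 1, xs =>
    let window := PySem.List.slice xs none (some ((xs.length : Int) - ((k : Int) + 1) + 1))
    match PySem.List.max? window (fun y => y) with
    | none => []      -- Python's max([]) raises; unreachable: every call keeps k ≤ len(xs)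
    | some m =>
      match PySem.List.index? window m with
      | none => []    -- unreachable: m ∈ window
      | some i => m :: pickB k (PySem.List.slice xs (some ((i : Int) + 1)) none)

def findBiggerJoltage_alt (line : List Int) : String :=
  PySem.Str.join "" ((pickB (min 12 line.length) line).map PySem.Int.toStr)

-- ===== PRECONDITION & SPEC =====
def Spec_findBiggerJoltage (line : List Int) (out : String) : Prop := out = findBiggerJoltage_alt line
instance (line : List Int) (out : String) : Decidable (Spec_findBiggerJoltage line out) := by unfold Spec_findBiggerJoltage; infer_instance

-- ===== CLAIM (what is proved, stated in full; the proofs are below) =====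
def Claim_equal_findBiggerJoltage : Prop := ∀ (line : List Int), Dom_findBiggerJoltage line → Spec_findBiggerJoltage line (findBiggerJoltage line)

-- ===== LEMMAS AND PROOFS =====

-- proof-side model of A's stack pass: stack reversed (head = top), capacity a parameter
def popR (cap : Nat) : List Int → Int → Nat → List Int
  | [], _, _ => []
  | h :: t, v, m => if h < v ∧ t.length + 1 + m > cap then popR cap t v m else h :: t

def runC (cap : Nat) : List Int → List Int → List Int
  | r, [] => r
  | r, v :: rest =>
    let r' := popR cap r v (rest.length + 1)
    runC cap (if r'.length < cap then v :: r' else r') rest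

lemma popLoop_eq (v : Int) (m : Nat) :
    ∀ r : List Int, popLoop r.reverse v (m : Int) = (popR 12 r v m).reverse := by
  intro r
  induction r with
  | nil => simp [popLoop, popR]
  | cons h t ih =>
    rw [popR, List.reverse_cons, popLoop]
    have hne : t.reverse ++ [h] ≠ [] := by simp
    rw [dif_neg hne]
    by_cases hc : h < v ∧ t.length + 1 + m > 12
    · rw [if_pos, if_pos hc, List.dropLast_concat, ih]
      refine ⟨by rw [List.getLast_concat]; exact hc.1, ?_⟩
      have : (t.reverse ++ [h]).length = t.length + 1 := by simp
      rw [this]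
      push_cast
      omega
    · rw [if_neg, if_neg hc]
      · simp
      · rw [List.getLast_concat]
        have : (t.reverse ++ [h]).length = t.length + 1 := by simp
        rw [this]
        intro ⟨h1, h2⟩
        exact hc ⟨h1, by omega⟩

lemma loopA_eq (rem : List Int) : ∀ (r : List Int) (sz i : Int), sz - i = rem.length →
    loopA sz r.reverse i rem = (runC 12 r rem).reverse := by
  induction rem with
  | nil => intro r sz i _; rfl
  | cons v rest ih =>
    intro r sz i hsz
    rw [loopA, runC]
    have h1 : sz - i = ((rest.length + 1 : Nat) : Int) := by
      rw [hsz]; push_cast [List.length_cons]; ring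
    rw [h1, popLoop_eq]
    by_cases hl : (popR 12 r v (rest.length + 1)).length < 12
    · rw [if_pos (by simpa using hl), if_pos hl, ← List.reverse_cons]
      exact ih _ sz (i + 1) (by simp only [List.length_cons] at hsz; push_cast at hsz ⊢; omega)
    · rw [if_neg (by simpa using hl), if_neg hl]
      exact ih _ sz (i + 1) (by simp only [List.length_cons] at hsz; push_cast at hsz ⊢; omega)

lemma popR_mem (cap : Nat) (v : Int) (m : Nat) : ∀ r, ∀ x ∈ popR cap r v m, x ∈ r := by
  intro r
  induction r with
  | nil => simp [popR]
  | cons h t ih =>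
    intro x hx
    rw [popR] at hx
    split_ifs at hx with hc
    · exact List.mem_cons_of_mem h (ih x hx)
    · exact hx

lemma popR_popAll (cap : Nat) (v : Int) (m : Nat) (hm : cap ≤ m) :
    ∀ r, (∀ u ∈ r, u < v) → popR cap r v m = [] := by
  intro r
  induction r with
  | nil => intro _; rfl
  | cons h t ih =>
    intro hall
    rw [popR, if_pos ⟨hall h (List.mem_cons_self), by omega⟩]
    exact ih fun u hu => hall u (List.mem_cons_of_mem h hu)

lemma runC_prefix (cap : Nat) (v : Int) (rest : List Int) (hcap : 1 ≤ cap)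
    (hbud : cap ≤ rest.length + 1) :
    ∀ (p s : List Int), (∀ u ∈ s, u < v) → (∀ u ∈ p, u < v) →
    runC cap s (p ++ v :: rest) = runC cap [v] rest := by
  intro p
  induction p with
  | nil =>
    intro s hs _
    rw [List.nil_append, runC, popR_popAll cap v _ hbud s hs]
    have : (([] : List Int).length < cap) := by simpa using hcap
    rw [if_pos this]
  | cons u p' ih =>
    intro s hs hp
    have hu : u < v := hp u (List.mem_cons_self)
    rw [List.cons_append, runC]
    have hm : ∀ x ∈ popR cap s u ((p' ++ v :: rest).length + 1), x < v :=
      fun x hx => hs x (popR_mem cap u _ s x hx)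
    split_ifs with hl
    · exact ih _ (fun x hx => (List.mem_cons.mp hx).elim (fun h => h ▸ hu) (hm x))
        (fun x hx => hp x (List.mem_cons_of_mem u hx))
    · exact ih _ hm (fun x hx => hp x (List.mem_cons_of_mem u hx))

lemma popR_shift (cap : Nat) (v u : Int) (m : Nat) (hbot : cap + 1 ≤ m → u ≤ v) :
    ∀ r, popR (cap + 1) (r ++ [v]) u m = popR cap r u m ++ [v] := by
  intro r
  induction r with
  | nil =>
    rw [List.nil_append, popR, popR, if_neg]
    · simp
    · simp only [List.length_nil]
      rintro ⟨h1, h2⟩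
      have := hbot (by omega)
      omega
  | cons h t ih =>
    rw [List.cons_append, popR, popR]
    have hlen : (t ++ [v]).length = t.length + 1 := by simp
    by_cases hc : h < u ∧ t.length + 1 + m > cap
    · rw [if_pos ⟨hc.1, by rw [hlen]; omega⟩, if_pos hc, ih]
    · rw [if_neg (by rw [hlen]; intro ⟨h1, h2⟩; exact hc ⟨h1, by omega⟩), if_neg hc,
        List.cons_append]

lemma runC_shift (cap : Nat) (v : Int) :
    ∀ (rem r : List Int),
    (∀ j (hj : j < rem.length), cap + 1 ≤ rem.length - j → rem[j] ≤ v) →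
    runC (cap + 1) (r ++ [v]) rem = runC cap r rem ++ [v] := by
  intro rem
  induction rem with
  | nil => intro r _; rfl
  | cons u rest ih =>
    intro r H
    rw [runC, runC]
    have hbot : cap + 1 ≤ rest.length + 1 → u ≤ v := fun h => by
      have := H 0 (by simp) (by simpa using h)
      simpa using this
    rw [popR_shift cap v u (rest.length + 1) hbot r]
    have hlen : (popR cap r u (rest.length + 1) ++ [v]).length =
        (popR cap r u (rest.length + 1)).length + 1 := by simp
    have H' : ∀ j (hj : j < rest.length), cap + 1 ≤ rest.length - j → rest[j] ≤ v := by
      intro j hj hge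
      have := H (j + 1) (by simpa using by omega) (by simpa using by omega)
      simpa using this
    by_cases hl : (popR cap r u (rest.length + 1)).length < cap
    · rw [if_pos (by rw [hlen]; omega), if_pos hl, ← List.cons_append]
      exact ih _ H'
    · rw [if_neg (by rw [hlen]; omega), if_neg hl]
      exact ih _ H' 

lemma runC_zero (rem : List Int) : runC 0 [] rem = [] := by
  induction rem with
  | nil => rfl
  | cons v rest ih => rw [runC]; simpa [popR] using ih

theorem runC_eq_pickB (n : Nat) : ∀ xs : List Int, xs.length ≤ n → ∀ cap : Nat,
    (runC cap [] xs).reverse = pickB (min cap xs.length) xs := by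
  induction n with
  | zero =>
    intro xs hlen cap
    have hx : xs = [] := List.length_eq_zero_iff.mp (Nat.le_zero.mp hlen)
    subst hx
    simp [runC, pickB]
  | succ n ih =>
    intro xs hlen cap
    match xs, cap with
    | [], _ => simp [runC, pickB]
    | x :: tl, 0 => rw [runC_zero]; simp [pickB]
    | x :: tl, c + 1 =>
      set l : List Int := x :: tl with hl
      have hNpos : 1 ≤ l.length := by simp [hl]
      by_cases hcn : c + 1 ≤ l.length
      · -- k = cap = c+1 ≤ len: window = take (len - c) l
        have hb : (l.length : Int) - ((c : Int) + 1) + 1 = ((l.length - c : Nat) : Int) := by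
          omega
        have hw : PySem.List.slice l none (some ((l.length : Int) - ((c : Int) + 1) + 1)) =
            l.take (l.length - c) := by
          rw [hb, PySem.List.slice_to_natCast]
        have hwlen : (l.take (l.length - c)).length = l.length - c := by
          simp [List.length_take]
        obtain ⟨m, hmax⟩ : ∃ m, PySem.List.max? (l.take (l.length - c)) (fun y => y) = some m := by
          cases hE : PySem.List.max? (l.take (l.length - c)) (fun y => y) with
          | none =>
            exfalso
            have := (PySem.List.max?_eq_none_iff _ _).mp hE
            have : (l.take (l.length - c)).length = 0 := by rw [this]; rfl
            omega
          | some m => exact ⟨m, rfl⟩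
        have hmem := PySem.List.max?_mem hmax
        obtain ⟨i, hidx⟩ : ∃ i, PySem.List.index? (l.take (l.length - c)) m = some i := by
          have := (PySem.List.index?_isSome_iff (l.take (l.length - c)) m).mpr hmem
          exact Option.isSome_iff_exists.mp this
        obtain ⟨hiw, hwim, hprev⟩ := PySem.List.getElem_of_index?_eq_some hidx
        have hiN : i < l.length - c := hwlen ▸ hiw
        have hi : i < l.length := by omega
        have hxi : l[i] = m := by rw [← hwim, List.getElem_take]
        have hsplit : l = l.take i ++ m :: l.drop (i + 1) := by
          conv_lhs => rw [← List.take_append_drop i l]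
          rw [List.drop_eq_getElem_cons hi, hxi]
        have hprefix : ∀ u ∈ l.take i, u < m := by
          intro u hu
          obtain ⟨j, hj, rfl⟩ := List.getElem_of_mem hu
          have hji : j < i := by
            have := hj; simp [List.length_take] at this; omega
          have hjw : j < (l.take (l.length - c)).length := by omega
          have e1 : (l.take i)[j] = l[j] := List.getElem_take
          have e2 : (l.take (l.length - c))[j]'hjw = l[j] := List.getElem_take
          have hle := PySem.List.max?_isMax hmax _ (List.getElem_mem hjw)
          have hne := hprev j hji
          rw [e2] at hle hne
          rw [e1]
          exact lt_of_le_of_ne hle hne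
        have hrestlen : (l.drop (i + 1)).length = l.length - (i + 1) := by
          simp [List.length_drop]
        have hbud : c + 1 ≤ (l.drop (i + 1)).length + 1 := by omega
        have step1 : runC (c + 1) [] l = runC (c + 1) [m] (l.drop (i + 1)) := by
          conv_lhs => rw [hsplit]
          exact runC_prefix (c + 1) m _ (by omega) hbud (l.take i) [] (by simp) hprefix
        have H : ∀ j (hj : j < (l.drop (i + 1)).length),
            c + 1 ≤ (l.drop (i + 1)).length - j → (l.drop (i + 1))[j] ≤ m := by
          intro j hj hge
          have hjl : i + 1 + j < l.length := by omega
          have hjw : i + 1 + j < (l.take (l.length - c)).length := by omega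
          have e1 : (l.drop (i + 1))[j] = l[i + 1 + j] := List.getElem_drop
          have e2 : (l.take (l.length - c))[i + 1 + j]'hjw = l[i + 1 + j] := List.getElem_take
          have hle := PySem.List.max?_isMax hmax _ (List.getElem_mem hjw)
          rw [e2] at hle
          rw [e1]
          exact hle
        have step2 : runC (c + 1) [m] (l.drop (i + 1)) = runC c [] (l.drop (i + 1)) ++ [m] := by
          have := runC_shift c m (l.drop (i + 1)) [] H
          simpa using this
        have hcd : c ≤ (l.drop (i + 1)).length := by omega
        have ihr := ih (l.drop (i + 1)) (by omega) c
        rw [Nat.min_eq_left hcd] at ihr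
        have hdrop : PySem.List.slice l (some ((i : Int) + 1)) none = l.drop (i + 1) := by
          have : ((i : Int) + 1) = (((i + 1 : Nat)) : Int) := by push_cast; ring
          rw [this, PySem.List.slice_from_natCast]
        rw [Nat.min_eq_left hcn]
        conv_rhs => rw [pickB]
        simp only [hw, hmax, hidx, hdrop]
        rw [step1, step2, List.reverse_append]
        simp only [List.reverse_cons, List.reverse_nil, List.nil_append, List.singleton_append]
        rw [ihr]
      · -- len < cap: window = take 1 = [x], whole list is selected
        have hlc : l.length ≤ c := by omega
        have hb : (l.length : Int) - ((tl.length : Int) + 1) + 1 = ((1 : Nat) : Int) := by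
          simp [hl]
        have hw : PySem.List.slice l none (some ((l.length : Int) - ((tl.length : Int) + 1) + 1)) =
            [x] := by
          rw [hb, PySem.List.slice_to_natCast]; rfl
        have hmax : PySem.List.max? ([x]) (fun y : Int => y) = some x := by
          rw [PySem.List.max?_id_cons]; rfl
        have hidx : PySem.List.index? ([x]) x = some 0 := PySem.List.index?_cons_self x []
        have hmin : min (c + 1) l.length = tl.length + 1 := by
          simp [hl] at hlc ⊢; omega
        have H : ∀ j (hj : j < tl.length), c + 1 ≤ tl.length - j → tl[j] ≤ x := by
          intro j hj hge
          exfalso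
          have : tl.length ≤ c := by simp [hl] at hlc; omega
          omega
        have step1 : runC (c + 1) [] l = runC c [] tl ++ [x] := by
          rw [hl, runC]
          have h0 : popR (c + 1) [] x (tl.length + 1) = [] := rfl
          rw [h0]
          rw [if_pos (by simp)]
          have := runC_shift c x tl [] H
          simpa using this
        have ihr := ih tl (by simp [hl] at hlen; omega) c
        have hmt : min c tl.length = tl.length := by
          have : tl.length ≤ c := by simp [hl] at hlc; omega
          omega
        rw [hmt] at ihr
        rw [hmin]
        conv_rhs => rw [pickB]
        simp only [hw, hmax, hidx]
        have hdrop : PySem.List.slice l (some (((0 : Nat) : Int) + 1)) none = tl := by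
          have : (((0 : Nat) : Int) + 1) = (((1 : Nat)) : Int) := by norm_num
          rw [this, PySem.List.slice_from_natCast, hl]; rfl
        rw [hdrop, step1, List.reverse_append]
        simp only [List.reverse_cons, List.reverse_nil, List.nil_append, List.singleton_append]
        rw [ihr]

lemma foldl_strings (parts : List String) : ∀ a : String,
    parts.foldl (fun x y => x ++ y) a = a ++ PySem.Str.join "" parts := by
  induction parts with
  | nil =>
    intro a
    apply String.toList_inj.mp
    simp [PySem.Str.toList_join, PySem.Chars.join_nil]
  | cons s rest ih =>
    intro a
    rw [List.foldl_cons, ih]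
    apply String.toList_inj.mp
    cases rest with
    | nil => simp [PySem.Str.toList_join, PySem.Chars.join_singleton, PySem.Chars.join_nil]
    | cons q t =>
      simp [PySem.Str.toList_join, PySem.Chars.join_cons_cons]

lemma foldl_append_eq_join (l : List Int) :
    l.foldl (fun joltage num => joltage ++ PySem.Int.toStr num) "" =
    PySem.Str.join "" (l.map PySem.Int.toStr) := by
  rw [← List.foldl_map (f := PySem.Int.toStr) (g := fun x y => x ++ y)]
  rw [foldl_strings]
  apply String.toList_inj.mp
  simp

-- ===== VERDICT (by name: the statement is the Claim_ definition above) =====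
theorem findBiggerJoltage_spec : Claim_equal_findBiggerJoltage := by
  intro line _
  unfold Spec_findBiggerJoltage findBiggerJoltage findBiggerJoltage_alt
  have h1 : loopA (line.length : Int) [] 0 line = (runC 12 [] line).reverse := by
    have := loopA_eq line [] (line.length : Int) 0 (by simp)
    simpa using this
  rw [h1, foldl_append_eq_join, runC_eq_pickB line.length line le_rfl 12]
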